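-- pv_equiv track=rewrite | github.com/ImranZafar28/CodeSignal-Arcade-Intro | Dark Wilderness/Bishop and Pawn.py | solution
-- ===== SOURCE A (Python) =====
-- def solution(bishop, pawn):
--     board1 = [['a7','b8'],
--             ['a6','b7','c8'],
--             ['a5','b6','c7','d8'],
--             ['a4','b5','c6','d7','e8'],
--             ['a3','b4','c5','d6','e7','f8'],
--             ['a2','b3','c4','d5','e6','f7','g8'],
--             ['a1','b2','c3','d4','e5','f6','g7','h8'],
--             ['b1','c2','d3','e4','f5','g6','h7'],
--             ['c1','d2','e3','f4','g5','h6'],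
--             ['d1','e2','f3','g4','h5'],
--             ['e1','f2','g3','h4'],
--             ['f1','g2','h3'],
--             ['g1','h2']]
--     board2 = [['a2','b1'],
--             ['a3','b2','c1'],
--             ['a4','b3','c2','d1'],
--             ['a5','b4','c3','d2','e1'],
--             ['a6','b5','c4','d3','e2','f1'],
--             ['a7','b6','c5','d4','e3','f2','g1'],
--             ['a8','b7','c6','d5','e4','f3','g2','h1'],
--             ['b8','c7','d6','e5','f4','g3','h2'],
--             ['c8','d7','e6','f5','g4','h3'],
--             ['d8','e7','f6','g5','h4'],
--             ['e8','f7','g6','h5'],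
--             ['f8','g7','h6'],
--             ['g8','h7']]
--     for i in range(len(board1)):
--         if bishop in board1[i] and pawn in board1[i]:
--             return True
--         elif bishop in board2[i] and pawn in board2[i]:
--             return True
--     return False
-- ===== SOURCE B (Python) =====
-- def solution(bishop, pawn):
--     if len(bishop) != 2 or len(pawn) != 2:
--         return False
--     bf, br, pf, pr = bishop[0], bishop[1], pawn[0], pawn[1]
--     if not ('a' <= bf <= 'h' and '1' <= br <= '8'
--             and 'a' <= pf <= 'h' and '1' <= pr <= '8'):
--         return False
--     return abs(ord(bf) - ord(pf)) == abs(ord(br) - ord(pr))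
-- ===== Notes on version B (the rewrite author's own statement) =====
-- stated objective: simpler
-- what changed: Replaces the two precomputed diagonal tables and the membership-scan loop with a coordinate-validity check plus the closed-form test |file distance| == |rank distance| on the two characters.
import Mathlib
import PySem

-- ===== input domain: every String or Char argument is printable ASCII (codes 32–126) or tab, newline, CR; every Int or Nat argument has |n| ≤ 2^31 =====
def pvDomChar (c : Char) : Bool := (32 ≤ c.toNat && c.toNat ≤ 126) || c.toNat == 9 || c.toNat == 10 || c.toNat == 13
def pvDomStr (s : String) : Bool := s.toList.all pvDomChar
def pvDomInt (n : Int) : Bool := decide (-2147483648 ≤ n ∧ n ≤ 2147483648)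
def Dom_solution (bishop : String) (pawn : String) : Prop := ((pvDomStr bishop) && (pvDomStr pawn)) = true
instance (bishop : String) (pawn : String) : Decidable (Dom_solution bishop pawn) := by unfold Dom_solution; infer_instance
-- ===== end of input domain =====

-- B replaces A's two precomputed diagonal tables and their membership-scan loop with a
-- coordinate-validity check plus the closed-form test |file distance| == |rank distance|
-- (objective: simpler).

-- ===== PORT A =====
def pvBoard1 : List (List String) :=
  [["a7","b8"],
   ["a6","b7","c8"],
   ["a5","b6","c7","d8"],
   ["a4","b5","c6","d7","e8"],
   ["a3","b4","c5","d6","e7","f8"],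
   ["a2","b3","c4","d5","e6","f7","g8"],
   ["a1","b2","c3","d4","e5","f6","g7","h8"],
   ["b1","c2","d3","e4","f5","g6","h7"],
   ["c1","d2","e3","f4","g5","h6"],
   ["d1","e2","f3","g4","h5"],
   ["e1","f2","g3","h4"],
   ["f1","g2","h3"],
   ["g1","h2"]]
def pvBoard2 : List (List String) :=
  [["a2","b1"],
   ["a3","b2","c1"],
   ["a4","b3","c2","d1"],
   ["a5","b4","c3","d2","e1"],
   ["a6","b5","c4","d3","e2","f1"],
   ["a7","b6","c5","d4","e3","f2","g1"],
   ["a8","b7","c6","d5","e4","f3","g2","h1"],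
   ["b8","c7","d6","e5","f4","g3","h2"],
   ["c8","d7","e6","f5","g4","h3"],
   ["d8","e7","f6","g5","h4"],
   ["e8","f7","g6","h5"],
   ["f8","g7","h6"],
   ["g8","h7"]]

-- the 'for i in range(len(board1))' loop with its two early returns
def pvLoopA (bishop pawn : String) : List Nat → Bool
  | [] => false
  | i :: rest =>
    if (pvBoard1.getD i []).contains bishop && (pvBoard1.getD i []).contains pawn then true
    else if (pvBoard2.getD i []).contains bishop && (pvBoard2.getD i []).contains pawn then true
    else pvLoopA bishop pawn rest

def solution (bishop : String) (pawn : String) : Bool :=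
  pvLoopA bishop pawn (List.range pvBoard1.length)

-- ===== PORT B =====
-- Source B's two-character shape test (len == 2 then s[0], s[1]) is the match on toList
def solution_alt (bishop : String) (pawn : String) : Bool :=
  match bishop.toList, pawn.toList with
  | [bf, br], [pf, pr] =>
    if 'a' ≤ bf && bf ≤ 'h' && '1' ≤ br && br ≤ '8'
       && 'a' ≤ pf && pf ≤ 'h' && '1' ≤ pr && pr ≤ '8' then
      ((bf.toNat : Int) - (pf.toNat : Int)).natAbs = ((br.toNat : Int) - (pr.toNat : Int)).natAbs
    else false
  | _, _ => false

-- ===== PRECONDITION & SPEC =====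
def Spec_solution (bishop : String) (pawn : String) (out : Bool) : Prop := out = solution_alt bishop pawn
instance (bishop : String) (pawn : String) (out : Bool) : Decidable (Spec_solution bishop pawn out) := by unfold Spec_solution; infer_instance

-- ===== CLAIM (what is proved, stated in full; the proofs are below) =====
def Claim_equal_solution : Prop := ∀ (bishop : String) (pawn : String), Dom_solution bishop pawn → Spec_solution bishop pawn (solution bishop pawn)

-- ===== LEMMAS AND PROOFS =====

-- a legal chessboard coordinate "a1".."h8"
def pvIsSquare (s : String) : Bool :=
  match s.toList with
  | [f, r] => 'a' ≤ f && f ≤ 'h' && '1' ≤ r && r ≤ '8'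
  | _ => false

-- A = B on all 4096 pairs of legal squares, enumerated via Fin 8 coordinates
theorem pv_key : ∀ a b c d : Fin 8,
    solution (String.ofList [Char.ofNat (97 + a.val), Char.ofNat (49 + b.val)])
             (String.ofList [Char.ofNat (97 + c.val), Char.ofNat (49 + d.val)])
  = solution_alt (String.ofList [Char.ofNat (97 + a.val), Char.ofNat (49 + b.val)])
             (String.ofList [Char.ofNat (97 + c.val), Char.ofNat (49 + d.val)]) := by
  decide

-- every legal square string is of the enumerated form
theorem pv_square_form (s : String) (hs : pvIsSquare s = true) :
    ∃ a b : Fin 8, s = String.ofList [Char.ofNat (97 + a.val), Char.ofNat (49 + b.val)] := by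
  unfold pvIsSquare at hs
  rcases hl : s.toList with _ | ⟨f, _ | ⟨r, _ | _⟩⟩ <;> rw [hl] at hs <;> simp at hs
  obtain ⟨⟨⟨h1, h2⟩, h3⟩, h4⟩ := hs
  simp [Char.le_def] at h1 h2 h3 h4
  simp [UInt32.le_iff_toNat_le] at h1 h2 h3 h4
  refine ⟨⟨f.toNat - 97, by omega⟩, ⟨r.toNat - 49, by omega⟩, ?_⟩
  have hf : Char.ofNat (97 + (f.toNat - 97)) = f := by
    have : 97 + (f.toNat - 97) = f.toNat := by omega
    rw [this, Char.ofNat_toNat]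
  have hr : Char.ofNat (49 + (r.toNat - 49)) = r := by
    have : 49 + (r.toNat - 49) = r.toNat := by omega
    rw [this, Char.ofNat_toNat]
  rw [hf, hr, ← hl, String.ofList_toList]

-- every string occurring in either table is a legal square
theorem pv_flat_squares : ∀ x ∈ (pvBoard1 ++ pvBoard2).flatten, pvIsSquare x = true := by decide

-- any element of a row accessed by the loop is an element of the flattened table
theorem pv_getD_sub (board : List (List String)) (i : Nat) :
    ∀ x ∈ (board[i]?.getD []), x ∈ board.flatten := by
  intro x hx
  rcases h : board[i]? with _ | row
  · rw [h] at hx; simp at hx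
  · rw [h] at hx
    exact List.mem_flatten.mpr ⟨row, List.mem_of_getElem? h, hx⟩

-- if one of the arguments is not a legal square, A's loop never fires and returns false
theorem pv_loopA_false (bishop pawn : String)
    (h : ¬(pvIsSquare bishop = true ∧ pvIsSquare pawn = true)) :
    ∀ l : List Nat, pvLoopA bishop pawn l = false := by
  intro l
  induction l with
  | nil => rfl
  | cons i rest ih =>
    have hsq : ∀ x : String, x ∈ (pvBoard1[i]?.getD []) ∨ x ∈ (pvBoard2[i]?.getD []) →
        pvIsSquare x = true := by
      intro x hx
      apply pv_flat_squares
      rw [List.flatten_append]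
      rcases hx with hx | hx
      · exact List.mem_append_left _ (pv_getD_sub pvBoard1 i x hx)
      · exact List.mem_append_right _ (pv_getD_sub pvBoard2 i x hx)
    unfold pvLoopA
    rw [if_neg, if_neg]
    · exact ih
    · intro hc; simp [List.getD] at hc
      exact h ⟨hsq bishop (Or.inr hc.1), hsq pawn (Or.inr hc.2)⟩
    · intro hc; simp [List.getD] at hc
      exact h ⟨hsq bishop (Or.inl hc.1), hsq pawn (Or.inl hc.2)⟩

-- if one of the arguments is not a legal square, B's validity check fails and it returns false
theorem pv_alt_false (bishop pawn : String)
    (h : ¬(pvIsSquare bishop = true ∧ pvIsSquare pawn = true)) :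
    solution_alt bishop pawn = false := by
  unfold solution_alt
  split
  · rename_i bf br pf pr hbl hpl
    unfold pvIsSquare at h
    rw [hbl, hpl] at h
    simp at h ⊢
    intro c1 c2 c3 c4 c5 c6 c7 c8
    exact absurd (h c1 c2 c3 c4) (by simp [c5, c6, c7, c8])
  · rfl

-- ===== VERDICT (by name: the statement is the Claim_ definition above) =====
theorem solution_spec : Claim_equal_solution := by
  intro bishop pawn _
  by_cases hsq : pvIsSquare bishop = true ∧ pvIsSquare pawn = true
  · obtain ⟨a, b, rfl⟩ := pv_square_form bishop hsq.1
    obtain ⟨c, d, rfl⟩ := pv_square_form pawn hsq.2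
    exact pv_key a b c d
  · show solution bishop pawn = solution_alt bishop pawn
    unfold solution
    rw [pv_loopA_false bishop pawn hsq, pv_alt_false bishop pawn hsq]
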